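-- pv_equiv track=rewrite | github.com/KedarAthrey/HeartAttackRiskPrediction | HeartRiskBack.py | get_age_group
-- ===== SOURCE A (Python) =====
-- def get_age_group(age):
--     age_groups = ['child', 'Young_Adult', 'Older_Adult', 'Middle_Aged', 'Y_Senior_Citizen', 'O_Senior_Citizen', 'Elderly']
--     if age <= 25:
--         index = 0
--     elif age <= 35:
--         index = 1
--     elif age <= 45:
--         index = 2
--     elif age <= 55:
--         index = 3
--     elif age <= 65:
--         index = 4
--     elif age <= 75:
--         index = 5
--     else:
--         index = 6
--     return [1 if i == index else 0 for i in range(len(age_groups))]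
-- ===== SOURCE B (Python) =====
-- def get_age_group(age):
--     def one_hot(ts):
--         # emit the list directly: a leading 1 as soon as the age fits the
--         # current bucket, otherwise a 0 and recurse on the remaining ceilings
--         if not ts or age <= ts[0]:
--             return [1] + [0] * len(ts)
--         return [0] + one_hot(ts[1:])
--     return one_hot([25, 35, 45, 55, 65, 75])
-- ===== Notes on version B (the rewrite author's own statement) =====
-- stated objective: alternative
-- what changed: B never computes a group index and has no one-hot range pass: a recursion over the threshold list emits the output list directly, producing a leading one (padded with zeros) at the first bucket the age fits and a zero otherwise.
import Mathlib
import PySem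

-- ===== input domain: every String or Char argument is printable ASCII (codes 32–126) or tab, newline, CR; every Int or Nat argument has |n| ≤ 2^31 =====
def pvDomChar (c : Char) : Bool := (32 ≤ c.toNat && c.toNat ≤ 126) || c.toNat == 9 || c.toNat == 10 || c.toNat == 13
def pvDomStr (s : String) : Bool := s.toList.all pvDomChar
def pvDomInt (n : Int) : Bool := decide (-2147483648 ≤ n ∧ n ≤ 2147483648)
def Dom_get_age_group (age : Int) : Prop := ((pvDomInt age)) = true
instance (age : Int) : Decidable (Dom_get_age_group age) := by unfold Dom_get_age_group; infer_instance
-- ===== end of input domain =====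

-- ===== PORT A =====
-- B builds the one-hot list directly by recursion over the thresholds (no index, no range pass).
def get_age_group (age : Int) : List Int :=
  let index : Int :=
    if age ≤ 25 then 0
    else if age ≤ 35 then 1
    else if age ≤ 45 then 2
    else if age ≤ 55 then 3
    else if age ≤ 65 then 4
    else if age ≤ 75 then 5
    else 6
  (PySem.List.pyRange 0 7 1).map (fun i => if i == index then (1 : Int) else 0)

-- ===== PORT B =====
def pvOneHot (age : Int) : List Int → List Int
  | [] => [1]
  | t :: ts => if age ≤ t then 1 :: List.replicate (ts.length + 1) 0 else 0 :: pvOneHot age ts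

def get_age_group_alt (age : Int) : List Int :=
  pvOneHot age [25, 35, 45, 55, 65, 75]

-- ===== PRECONDITION & SPEC =====
def Spec_get_age_group (age : Int) (out : List Int) : Prop := out = get_age_group_alt age
instance (age : Int) (out : List Int) : Decidable (Spec_get_age_group age out) := by unfold Spec_get_age_group; infer_instance

-- ===== CLAIM (what is proved, stated in full; the proofs are below) =====
def Claim_equal_get_age_group : Prop := ∀ (age : Int), Dom_get_age_group age → Spec_get_age_group age (get_age_group age)

-- ===== LEMMAS AND PROOFS =====

-- ===== VERDICT (by name: the statement is the Claim_ definition above) =====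
theorem get_age_group_spec : Claim_equal_get_age_group := by
  intro age _
  unfold Spec_get_age_group get_age_group get_age_group_alt
  have hr : PySem.List.pyRange 0 7 1 = [0, 1, 2, 3, 4, 5, 6] := by decide
  rw [hr]
  split_ifs with h1 h2 h3 h4 h5 h6
  · norm_num [pvOneHot, List.replicate, h1]
  · norm_num [pvOneHot, List.replicate, h1, h2]
  · norm_num [pvOneHot, List.replicate, h1, h2, h3]
  · norm_num [pvOneHot, List.replicate, h1, h2, h3, h4]
  · norm_num [pvOneHot, List.replicate, h1, h2, h3, h4, h5]
  · norm_num [pvOneHot, List.replicate, h1, h2, h3, h4, h5, h6]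
  · norm_num [pvOneHot, List.replicate, h1, h2, h3, h4, h5, h6]
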